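-- pv_equiv track=rewrite | github.com/lulzzz/Plan | workflows/core/df_utils.py | get_two_df_column_mapping_count_points
-- ===== SOURCE A (Python) =====
-- def get_two_df_column_mapping_count_points(test_dict, remaining_fields, minimum_points=135):
--     if len(remaining_fields) > 0:
--         counter_dict = dict()
--
--         for field in remaining_fields:
--             counter_dict.setdefault(field, 0)
--
--             # Iterate through tests
--             for test_k, test_v in test_dict.items():
--                 # Iterate through test results
--                 for field_k, field_v in test_v.items():
--                     if field_k == field:
--                         counter_dict[field] += field_v
--
--         counter_dict_max_key = max(counter_dict, key=counter_dict.get)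
--         if counter_dict[counter_dict_max_key] > minimum_points:
--             return counter_dict_max_key
--
--     return None
-- ===== SOURCE B (Python) =====
-- def get_two_df_column_mapping_count_points(test_dict, remaining_fields, minimum_points=135):
--     if not remaining_fields:
--         return None
--     # one pass over all tests: total points per field name
--     sums = {}
--     for test_v in test_dict.values():
--         for field_k, field_v in test_v.items():
--             sums[field_k] = sums.get(field_k, 0) + field_v
--     # one pass over the fields (a repeated field accumulates, as in A)
--     counter = {}
--     for field in remaining_fields:
--         counter[field] = counter.get(field, 0) + sums.get(field, 0)
--     best = max(counter, key=counter.get)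
--     return best if counter[best] > minimum_points else None
-- ===== Notes on version B (the rewrite author's own statement) =====
-- stated objective: faster
-- what changed: B replaces A's per-field rescan of the whole test_dict (O(F*T*K)) by one accumulation pass over all tests into a per-field sums dict followed by one O(1)-lookup pass over remaining_fields.
import Mathlib
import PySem

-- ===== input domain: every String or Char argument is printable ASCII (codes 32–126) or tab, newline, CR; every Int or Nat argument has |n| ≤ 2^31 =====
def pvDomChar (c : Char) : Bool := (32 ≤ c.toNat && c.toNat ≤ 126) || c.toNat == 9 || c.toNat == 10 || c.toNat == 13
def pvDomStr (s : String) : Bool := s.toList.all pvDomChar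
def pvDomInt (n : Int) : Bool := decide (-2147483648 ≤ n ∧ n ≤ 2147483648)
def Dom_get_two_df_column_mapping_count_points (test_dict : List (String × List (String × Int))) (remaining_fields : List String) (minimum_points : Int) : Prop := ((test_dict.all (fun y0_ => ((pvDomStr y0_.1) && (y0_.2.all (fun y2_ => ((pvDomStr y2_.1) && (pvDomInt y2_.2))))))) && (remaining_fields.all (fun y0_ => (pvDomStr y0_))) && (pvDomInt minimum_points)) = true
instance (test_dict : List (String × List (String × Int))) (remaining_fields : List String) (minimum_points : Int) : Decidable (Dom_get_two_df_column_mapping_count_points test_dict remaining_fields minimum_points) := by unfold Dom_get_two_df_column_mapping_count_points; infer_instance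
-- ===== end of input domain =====

-- B replaces A's per-field rescan of every test (O(F·T·K)) by one accumulation pass over the
-- tests followed by one lookup pass over the fields (O(T·K + F)); same return value everywhere.

-- ===== PORT A =====
-- literal transliteration of A: for each field, setdefault then scan all tests adding matches
def get_two_df_column_mapping_count_points (test_dict : List (String × List (String × Int))) (remaining_fields : List String) (minimum_points : Int) : Option String :=
  if remaining_fields.length > 0 then
    let counter : PySem.Dict String Int :=
      remaining_fields.foldl (fun cd field =>
        let cd := cd.setdefault field 0
        test_dict.foldl (fun cd t =>
          t.2.foldl (fun cd p =>
            if p.1 == field then cd.modify field 0 (· + p.2) else cd) cd) cd)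
        PySem.Dict.empty
    match PySem.List.max? counter.keys (fun k => counter.getD k 0) with
    | some mk => if counter.getD mk 0 > minimum_points then some mk else none
    | none => none
  else none

-- ===== PORT B =====
-- transliteration of Source B: one pass builds per-field sums, one pass builds the counter by lookup
def get_two_df_column_mapping_count_points_alt (test_dict : List (String × List (String × Int))) (remaining_fields : List String) (minimum_points : Int) : Option String :=
  if remaining_fields = [] then none
  else
    let sums : PySem.Dict String Int :=
      test_dict.foldl (fun d t =>
        t.2.foldl (fun d p => d.insert p.1 (d.getD p.1 0 + p.2)) d) PySem.Dict.empty
    let counter : PySem.Dict String Int :=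
      remaining_fields.foldl (fun cd f => cd.insert f (cd.getD f 0 + sums.getD f 0)) PySem.Dict.empty
    match PySem.List.max? counter.keys (fun k => counter.getD k 0) with
    | some mk => if counter.getD mk 0 > minimum_points then some mk else none
    | none => none

-- ===== PRECONDITION & SPEC =====
def Spec_get_two_df_column_mapping_count_points (test_dict : List (String × List (String × Int))) (remaining_fields : List String) (minimum_points : Int) (out : Option String) : Prop := out = get_two_df_column_mapping_count_points_alt test_dict remaining_fields minimum_points
instance (test_dict : List (String × List (String × Int))) (remaining_fields : List String) (minimum_points : Int) (out : Option String) : Decidable (Spec_get_two_df_column_mapping_count_points test_dict remaining_fields minimum_points out) := by unfold Spec_get_two_df_column_mapping_count_points; infer_instance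

-- ===== CLAIM (what is proved, stated in full; the proofs are below) =====
def Claim_equal_get_two_df_column_mapping_count_points : Prop := ∀ (test_dict : List (String × List (String × Int))) (remaining_fields : List String) (minimum_points : Int), Dom_get_two_df_column_mapping_count_points test_dict remaining_fields minimum_points → Spec_get_two_df_column_mapping_count_points test_dict remaining_fields minimum_points (get_two_df_column_mapping_count_points test_dict remaining_fields minimum_points)

-- ===== LEMMAS AND PROOFS =====

-- total points attributed to field f by one test's result list / by the whole test_dict
def pvTvSum (f : String) (tv : List (String × Int)) : Int :=
  ((tv.filter (fun p => p.1 == f)).map (·.2)).sum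

def pvAllSum (test_dict : List (String × List (String × Int))) (f : String) : Int :=
  (test_dict.map (fun t => pvTvSum f t.2)).sum

-- A's inner loop over one test's items: only field f's slot changes, by pvTvSum
lemma pvA_inner_getD (f : String) (tv : List (String × Int)) :
    ∀ (cd : PySem.Dict String Int) (k : String),
    (tv.foldl (fun cd p => if p.1 == f then cd.modify f 0 (· + p.2) else cd) cd).getD k 0
      = cd.getD k 0 + (if k = f then pvTvSum f tv else 0) := by
  induction tv with
  | nil => intro cd k; simp [pvTvSum]
  | cons p tv ih =>
    intro cd k
    by_cases hp : p.1 == f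
    · simp only [List.foldl_cons, hp, if_true, ih, PySem.Dict.getD_modify, pvTvSum,
        List.filter_cons, List.map_cons, List.sum_cons]
      by_cases hk : k = f <;> simp [hk, pvTvSum] <;> ring
    · simp only [List.foldl_cons, hp, if_false, ih, pvTvSum, List.filter_cons]
      simp [hp, pvTvSum]

lemma pvA_inner_keys (f : String) (tv : List (String × Int)) :
    ∀ (cd : PySem.Dict String Int), cd.contains f = true →
    (tv.foldl (fun cd p => if p.1 == f then cd.modify f 0 (· + p.2) else cd) cd).keys = cd.keys
      ∧ (tv.foldl (fun cd p => if p.1 == f then cd.modify f 0 (· + p.2) else cd) cd).contains f = true := by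
  induction tv with
  | nil => intro cd hc; exact ⟨rfl, hc⟩
  | cons p tv ih =>
    intro cd hc
    by_cases hp : p.1 == f
    · simp only [List.foldl_cons, hp, if_true]
      obtain ⟨h1, h2⟩ := ih (cd.modify f 0 (· + p.2))
        (by simp [PySem.Dict.contains_modify])
      refine ⟨?_, h2⟩
      rw [h1, PySem.Dict.keys_modify, PySem.Dict.keys_insert_of_contains _ _ hc]
    · simp only [List.foldl_cons, hp, if_false]
      exact ih cd hc

-- A's middle loop over all tests
lemma pvA_outer_getD (f : String) (test_dict : List (String × List (String × Int))) :
    ∀ (cd : PySem.Dict String Int) (k : String),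
    (test_dict.foldl (fun cd t =>
        t.2.foldl (fun cd p => if p.1 == f then cd.modify f 0 (· + p.2) else cd) cd) cd).getD k 0
      = cd.getD k 0 + (if k = f then pvAllSum test_dict f else 0) := by
  induction test_dict with
  | nil => intro cd k; simp [pvAllSum]
  | cons t td ih =>
    intro cd k
    simp only [List.foldl_cons, ih, pvA_inner_getD, pvAllSum, List.map_cons, List.sum_cons]
    by_cases hk : k = f <;> simp [hk] <;> ring

lemma pvA_outer_keys (f : String) (test_dict : List (String × List (String × Int))) :
    ∀ (cd : PySem.Dict String Int), cd.contains f = true →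
    (test_dict.foldl (fun cd t =>
        t.2.foldl (fun cd p => if p.1 == f then cd.modify f 0 (· + p.2) else cd) cd) cd).keys = cd.keys := by
  induction test_dict with
  | nil => intro cd _; rfl
  | cons t td ih =>
    intro cd hc
    simp only [List.foldl_cons]
    obtain ⟨h1, h2⟩ := pvA_inner_keys f t.2 cd hc
    rw [ih _ h2, h1]

-- B's sums dict holds exactly pvAllSum
lemma pvB_sums_inner (f : String) (tv : List (String × Int)) :
    ∀ (d : PySem.Dict String Int),
    (tv.foldl (fun d p => d.insert p.1 (d.getD p.1 0 + p.2)) d).getD f 0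
      = d.getD f 0 + pvTvSum f tv := by
  induction tv with
  | nil => intro d; simp [pvTvSum]
  | cons p tv ih =>
    intro d
    simp only [List.foldl_cons, ih, PySem.Dict.getD_insert, pvTvSum, List.filter_cons]
    by_cases hp : p.1 == f
    · have hpf : f = p.1 := by simpa [eq_comm] using (beq_iff_eq.mp hp)
      simp [hp, ← hpf, pvTvSum]; ring
    · have hpf : ¬ f = p.1 := fun h => hp (by simp [h])
      simp [hp, hpf, pvTvSum]

lemma pvB_sums_getD (test_dict : List (String × List (String × Int))) (f : String) :
    ∀ (d : PySem.Dict String Int),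
    (test_dict.foldl (fun d t =>
        t.2.foldl (fun d p => d.insert p.1 (d.getD p.1 0 + p.2)) d) d).getD f 0
      = d.getD f 0 + pvAllSum test_dict f := by
  induction test_dict with
  | nil => intro d; simp [pvAllSum]
  | cons t td ih =>
    intro d
    simp only [List.foldl_cons, ih, pvB_sums_inner, pvAllSum, List.map_cons, List.sum_cons]
    ring

-- A's per-field step, summarised
lemma pvA_step_getD (test_dict : List (String × List (String × Int)))
    (cd : PySem.Dict String Int) (f k : String) :
    (test_dict.foldl (fun cd t =>
        t.2.foldl (fun cd p => if p.1 == f then cd.modify f 0 (· + p.2) else cd) cd)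
      (cd.setdefault f 0)).getD k 0
      = if k = f then cd.getD f 0 + pvAllSum test_dict f else cd.getD k 0 := by
  rw [pvA_outer_getD]
  by_cases hk : k = f
  · subst hk; simp [PySem.Dict.getD_setdefault_self]
  · have : (cd.setdefault f 0).getD k 0 = cd.getD k 0 := by
      rw [PySem.Dict.getD_eq_get?_getD, PySem.Dict.get?_setdefault_of_ne cd 0 hk,
        ← PySem.Dict.getD_eq_get?_getD]
    simp [hk, this]

lemma pvA_step_keys (test_dict : List (String × List (String × Int)))
    (cd : PySem.Dict String Int) (f : String) :
    (test_dict.foldl (fun cd t =>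
        t.2.foldl (fun cd p => if p.1 == f then cd.modify f 0 (· + p.2) else cd) cd)
      (cd.setdefault f 0)).keys
      = if cd.contains f = true then cd.keys else cd.keys ++ [f] := by
  rw [pvA_outer_keys f test_dict _ (by simp [PySem.Dict.contains_setdefault]),
    PySem.Dict.keys_setdefault]

-- the two counter-building loops agree on keys and on every lookup
lemma pvCounters_agree (test_dict : List (String × List (String × Int)))
    (sums : PySem.Dict String Int)
    (hs : ∀ f, sums.getD f 0 = pvAllSum test_dict f)
    (fields : List String) :
    ∀ (cdA cdB : PySem.Dict String Int), cdA.keys = cdB.keys →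
      (∀ k, cdA.getD k 0 = cdB.getD k 0) →
    (fields.foldl (fun cd field =>
        test_dict.foldl (fun cd t =>
          t.2.foldl (fun cd p => if p.1 == field then cd.modify field 0 (· + p.2) else cd) cd)
        (cd.setdefault field 0)) cdA).keys
      = (fields.foldl (fun cd f => cd.insert f (cd.getD f 0 + sums.getD f 0)) cdB).keys
    ∧ ∀ k,
    (fields.foldl (fun cd field =>
        test_dict.foldl (fun cd t =>
          t.2.foldl (fun cd p => if p.1 == field then cd.modify field 0 (· + p.2) else cd) cd)
        (cd.setdefault field 0)) cdA).getD k 0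
      = (fields.foldl (fun cd f => cd.insert f (cd.getD f 0 + sums.getD f 0)) cdB).getD k 0 := by
  induction fields with
  | nil => intro cdA cdB hk hg; exact ⟨hk, hg⟩
  | cons f fields ih =>
    intro cdA cdB hk hg
    simp only [List.foldl_cons]
    apply ih
    · have hc : cdA.contains f = cdB.contains f := by
        rw [PySem.Dict.contains_eq_decide_mem_keys, PySem.Dict.contains_eq_decide_mem_keys, hk]
      rw [pvA_step_keys]
      by_cases hcf : cdB.contains f = true
      · rw [if_pos (hc ▸ hcf), hk, PySem.Dict.keys_insert_of_contains _ _ hcf]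
      · rw [if_neg (by rw [hc]; exact hcf), hk,
          PySem.Dict.keys_insert_of_not_contains _ _ (by simpa using hcf)]
    · intro k
      rw [pvA_step_getD, PySem.Dict.getD_insert, hs, hg]
      by_cases hkf : k = f <;> simp [hkf, hg]

-- ===== VERDICT (by name: the statement is the Claim_ definition above) =====
theorem get_two_df_column_mapping_count_points_spec : Claim_equal_get_two_df_column_mapping_count_points := by
  intro test_dict remaining_fields minimum_points _
  unfold Spec_get_two_df_column_mapping_count_points
  unfold get_two_df_column_mapping_count_points get_two_df_column_mapping_count_points_alt
  cases remaining_fields with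
  | nil => simp
  | cons f fs =>
    rw [if_pos (by simp : (f :: fs).length > 0), if_neg (List.cons_ne_nil f fs)]
    obtain ⟨hk, hg⟩ := pvCounters_agree test_dict _
      (fun g => pvB_sums_getD test_dict g PySem.Dict.empty |>.trans (by simp))
      (f :: fs) PySem.Dict.empty PySem.Dict.empty rfl (fun _ => rfl)
    simp only [hk, hg]
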